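-- pv_equiv track=rewrite | github.com/ArmandoSanchez13/Python | CECS328PA1/cecs328pa1.py | longest
-- ===== SOURCE A (Python) =====
-- def sumdigits(num):
--     return sum(int(digit) for digit in str(num))
--
-- def longest(n):
--     maxlength = 0
--     temp = {}
--     i = 0
--     for j in range(len(n)):
--         current = sumdigits(n[j])
--         if current in temp:
--             i = max(i, temp[current])
--         maxlength = max(maxlength, j - i + 1)
--         temp[current] = j + 1
--     return maxlength
-- ===== SOURCE B (Python) =====
-- def sumdigits(num):
--     return sum(int(digit) for digit in str(num))
--
-- def longest(n):
--     maxlength = 0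
--     window = []
--     for x in n:
--         cur = sumdigits(x)
--         while cur in window:
--             window.pop(0)
--         window.append(cur)
--         maxlength = max(maxlength, len(window))
--     return maxlength
-- ===== Notes on version B (the rewrite author's own statement) =====
-- stated objective: simpler
-- what changed: Replaced the last-seen-index dict and the i = max(i, temp[current]) index jump by an explicit sliding window list of the digit-sums themselves: the window is shrunk from the front one element at a time until the new digit-sum is no longer present, and the answer is the maximum window length, with no index arithmetic and no dict.
import Mathlib
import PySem

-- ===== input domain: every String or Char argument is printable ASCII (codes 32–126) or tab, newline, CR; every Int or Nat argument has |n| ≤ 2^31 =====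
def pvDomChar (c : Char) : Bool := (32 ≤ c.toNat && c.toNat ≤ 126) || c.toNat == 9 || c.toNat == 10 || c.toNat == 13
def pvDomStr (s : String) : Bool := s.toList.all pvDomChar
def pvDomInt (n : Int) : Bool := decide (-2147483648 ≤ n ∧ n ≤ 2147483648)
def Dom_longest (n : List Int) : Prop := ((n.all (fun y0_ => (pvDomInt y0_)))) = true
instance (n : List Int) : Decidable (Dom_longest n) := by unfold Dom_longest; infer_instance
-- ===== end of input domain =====

-- B replaces A's last-seen-index dict and index jump by an explicit sliding window of digit-sums,
-- shrunk from the front one element at a time (objective: simpler, no index arithmetic).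

-- ===== PORT A =====
-- sum(int(digit) for digit in str(num)); int(digit) is PySem.Int.ofStr?, which is some on every
-- character of str(num) when 0 ≤ num (all digits); the '.getD 0' arm is never taken under
-- Pre_longest (for num < 0, int('-') raises ValueError in Python — excluded by Pre_longest).
def sumdigits (num : Int) : Int :=
  (((PySem.Int.toStr num).toList).map
    (fun digit => (PySem.Int.ofStr? (String.ofList [digit])).getD 0)).sum

-- loop body of A: state (maxlength, temp, i, j); the Python loops j over range(len(n)) and reads
-- n[j], which is exactly the successive elements x of n with j the running index carried in the state
def stepA : (Int × PySem.Dict Int Int × Int × Int) → Int → (Int × PySem.Dict Int Int × Int × Int)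
  | (ml, temp, i, j), x =>
    let current := sumdigits x
    let i' := match temp.get? current with     -- 'if current in temp: i = max(i, temp[current])'
      | some m => max i m
      | none => i
    (max ml (j - i' + 1), temp.insert current (j + 1), i', j + 1)

def longest (n : List Int) : Int :=
  (n.foldl stepA (0, PySem.Dict.empty, 0, 0)).1

-- ===== PORT B =====
-- 'while cur in window: window.pop(0)' — pop(0) on the (necessarily nonempty) list is drop 1
def shrink (cur : Int) (w : List Int) : List Int :=
  if h : cur ∈ w then shrink cur (w.drop 1) else w
termination_by w.length
decreasing_by
  have := List.length_pos_of_mem h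
  simp
  omega

-- loop body of B: state (maxlength, window)
def stepB : (Int × List Int) → Int → (Int × List Int)
  | (ml, window), x =>
    let cur := sumdigits x
    let window' := shrink cur window ++ [cur]
    (max ml ((window'.length : Int)), window')

def longest_alt (n : List Int) : Int :=
  (n.foldl stepB (0, [])).1

-- ===== PRECONDITION & SPEC =====
-- Pre_ excludes lists with a negative element: there sumdigits hits int('-') and BOTH Pythons raise ValueError.
def Pre_longest (n : List Int) : Prop := ∀ x ∈ n, 0 ≤ x
instance (n : List Int) : Decidable (Pre_longest n) := by unfold Pre_longest; infer_instance

def pvWitness_longest : List Int := [10, 1, 19, 0, 5]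

def Spec_longest (n : List Int) (out : Int) : Prop := out = longest_alt n
instance (n : List Int) (out : Int) : Decidable (Spec_longest n out) := by unfold Spec_longest; infer_instance

-- ===== CLAIM (what is proved, stated in full; the proofs are below) =====
def Claim_equal_longest : Prop := ∀ (n : List Int), Dom_longest n → Pre_longest n → Spec_longest n (longest n)

-- ===== LEMMAS AND PROOFS =====

-- Invariant tying A's state (temp, i, j) to B's window W after any processed prefix:
-- temp maps the digit-sum at window position t to absolute index i+t+1, and any key not in the
-- window has value ≤ i.
def WInv (temp : PySem.Dict Int Int) (i j : Int) (W : List Int) : Prop :=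
  0 ≤ i ∧ i + (W.length : Int) = j ∧ W.Nodup ∧
  (∀ (t : Nat) (ht : t < W.length), temp.get? W[t] = some (i + t + 1)) ∧
  (∀ v m, temp.get? v = some m → v ∉ W → m ≤ i)

lemma shrink_of_not_mem {cur : Int} {w : List Int} (h : cur ∉ w) : shrink cur w = w := by
  rw [shrink]; simp [h]

lemma shrink_eq_drop {cur : Int} : ∀ {W : List Int} (t : Nat) (ht : t < W.length),
    W.Nodup → W[t] = cur → shrink cur W = W.drop (t + 1) := by
  intro W
  induction W with
  | nil => intro t ht; simp at ht
  | cons w ws ih =>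
    intro t ht hnd hWt
    have hmem : cur ∈ w :: ws := hWt ▸ List.getElem_mem ht
    rw [shrink]; simp only [hmem, dif_pos, List.drop_one, List.tail_cons]
    cases t with
    | zero =>
      simp at hWt
      subst hWt
      have hw : w ∉ ws := (List.nodup_cons.mp hnd).1
      simpa using shrink_of_not_mem hw
    | succ u =>
      have hu : u < ws.length := by simpa using ht
      have : ws[u] = cur := by simpa using hWt
      simpa using ih u hu (List.nodup_cons.mp hnd).2 this

lemma step_inv (x ml : Int) (temp : PySem.Dict Int Int) (i j : Int) (W : List Int)
    (h : WInv temp i j W) :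
    ∃ ml' temp' i' j' W',
      stepA (ml, temp, i, j) x = (ml', temp', i', j') ∧
      stepB (ml, W) x = (ml', W') ∧ WInv temp' i' j' W' := by
  obtain ⟨hi0, hlen, hnd, hC1, hC2⟩ := h
  by_cases hc : sumdigits x ∈ W
  · -- cur in the window: A jumps i to its stored index; B drops up to and past it
    obtain ⟨t, ht, hWt⟩ := List.mem_iff_getElem.mp hc
    have hget : temp.get? (sumdigits x) = some (i + t + 1) := hWt ▸ hC1 t ht
    have hshr : shrink (sumdigits x) W = W.drop (t + 1) := shrink_eq_drop t ht hnd hWt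
    have hcurnew : sumdigits x ∈ W.drop (t + 1) ++ [sumdigits x] :=
      List.mem_append_right _ (List.mem_singleton.mpr rfl)
    have hnotdrop : sumdigits x ∉ W.drop (t + 1) := by
      intro hmem
      obtain ⟨u, hu, huv⟩ := List.mem_iff_getElem.mp hmem
      rw [List.getElem_drop] at huv
      have : t + 1 + u = t := (List.Nodup.getElem_inj_iff hnd).mp (huv.trans hWt.symm)
      omega
    refine ⟨max ml (j - (i + t + 1) + 1), temp.insert (sumdigits x) (j + 1), i + t + 1, j + 1,
      W.drop (t + 1) ++ [sumdigits x], ?_, ?_, ?_, ?_, ?_, ?_, ?_⟩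
    · have hmax : max i (i + (t : Int) + 1) = i + t + 1 := max_eq_right (by omega)
      simp only [stepA, hget, hmax]
    · have hlen2 : (((W.drop (t + 1) ++ [sumdigits x]).length : Nat) : Int)
          = j - (i + t + 1) + 1 := by
        simp only [List.length_append, List.length_drop, List.length_cons, List.length_nil]
        omega
      simp only [stepB, hshr, hlen2]
    · omega
    · simp only [List.length_append, List.length_drop, List.length_cons, List.length_nil]
      omega
    · exact (List.nodup_append_comm.mpr
        (List.Nodup.cons hnotdrop ((List.drop_sublist _ _).nodup hnd)))
    · -- C1 for the new state
      intro r hr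
      rcases lt_or_ge r (W.drop (t + 1)).length with hcase | hcase
      · have he : (W.drop (t + 1) ++ [sumdigits x])[r] = W[t + 1 + r]'(by simp at hcase; omega) := by
          rw [List.getElem_append_left hcase, List.getElem_drop]
        have hne : W[t + 1 + r]'(by simp at hcase; omega) ≠ sumdigits x := by
          intro heq
          have : t + 1 + r = t := (List.Nodup.getElem_inj_iff hnd).mp (heq.trans hWt.symm)
          omega
        rw [he, PySem.Dict.get?_insert_of_ne temp (j + 1) hne, hC1 (t + 1 + r) (by simp at hcase; omega)]
        congr 1
        push_cast
        ring
      · have hrl : r = (W.drop (t + 1)).length := by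
          simp only [List.length_append, List.length_cons, List.length_nil] at hr
          omega
        have he : (W.drop (t + 1) ++ [sumdigits x])[r] = sumdigits x := by
          subst hrl
          simp
        rw [he, PySem.Dict.get?_insert_self temp (sumdigits x) (j + 1)]
        congr 1
        simp only [hrl, List.length_drop]
        omega
    · -- C2 for the new state
      intro v m hm hv
      have hvne : v ≠ sumdigits x := fun hh => hv (hh ▸ hcurnew)
      rw [PySem.Dict.get?_insert_of_ne temp (j + 1) hvne] at hm
      by_cases hvW : v ∈ W
      · obtain ⟨u, hu, huv⟩ := List.mem_iff_getElem.mp hvW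
        have hut : u ≤ t := by
          by_contra hgt
          have h1 : t + 1 + (u - (t + 1)) < W.length := by omega
          have : v ∈ W.drop (t + 1) := by
            have : (W.drop (t + 1))[u - (t + 1)]'(by simp; omega) = v := by
              rw [List.getElem_drop]
              have h2 : t + 1 + (u - (t + 1)) = u := by omega
              simp only [h2]
              exact huv
            exact this ▸ List.getElem_mem _
          exact hv (List.mem_append_left _ this)
        have := hC1 u hu
        rw [huv, hm] at this
        have hmval : m = i + u + 1 := by injection this
        omega
      · have := hC2 v m hm hvW
        omega
  · -- cur not in the window
    have hshr : shrink (sumdigits x) W = W := shrink_of_not_mem hc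
    have hA : stepA (ml, temp, i, j) x
        = (max ml (j - i + 1), temp.insert (sumdigits x) (j + 1), i, j + 1) := by
      cases hg : temp.get? (sumdigits x) with
      | none => simp only [stepA, hg]
      | some m =>
        have hm : m ≤ i := hC2 _ m hg hc
        have hmax : max i m = i := max_eq_left hm
        simp only [stepA, hg, hmax]
    refine ⟨max ml (j - i + 1), temp.insert (sumdigits x) (j + 1), i, j + 1,
      W ++ [sumdigits x], hA, ?_, ?_, ?_, ?_, ?_, ?_⟩
    · have hlen2 : (((W ++ [sumdigits x]).length : Nat) : Int) = j - i + 1 := by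
        simp only [List.length_append, List.length_cons, List.length_nil]
        omega
      simp only [stepB, hshr, hlen2]
    · exact hi0
    · simp only [List.length_append, List.length_cons, List.length_nil]
      omega
    · exact (List.nodup_append_comm.mpr (List.Nodup.cons hc hnd))
    · intro r hr
      rcases lt_or_ge r W.length with hcase | hcase
      · have he : (W ++ [sumdigits x])[r] = W[r]'hcase := List.getElem_append_left hcase
        have hne : W[r]'hcase ≠ sumdigits x := fun hh => hc (hh ▸ List.getElem_mem hcase)
        rw [he, PySem.Dict.get?_insert_of_ne temp (j + 1) hne]
        exact hC1 r hcase
      · have hrl : r = W.length := by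
          simp only [List.length_append, List.length_cons, List.length_nil] at hr
          omega
        have he : (W ++ [sumdigits x])[r] = sumdigits x := by subst hrl; simp
        rw [he, PySem.Dict.get?_insert_self temp (sumdigits x) (j + 1)]
        congr 1
        omega
    · intro v m hm hv
      have hvne : v ≠ sumdigits x := by
        intro hh
        exact hv (hh ▸ List.mem_append_right _ (List.mem_singleton.mpr rfl))
      rw [PySem.Dict.get?_insert_of_ne temp (j + 1) hvne] at hm
      exact hC2 v m hm (fun hW => hv (List.mem_append_left _ hW))

lemma fold_eq (l : List Int) : ∀ (ml : Int) (temp : PySem.Dict Int Int) (i j : Int) (W : List Int),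
    WInv temp i j W → (l.foldl stepA (ml, temp, i, j)).1 = (l.foldl stepB (ml, W)).1 := by
  induction l with
  | nil => intro ml temp i j W _; rfl
  | cons x xs ih =>
    intro ml temp i j W h
    obtain ⟨ml', temp', i', j', W', hA, hB, hInv⟩ := step_inv x ml temp i j W h
    simp only [List.foldl_cons, hA, hB]
    exact ih ml' temp' i' j' W' hInv

lemma inv_init : WInv PySem.Dict.empty 0 0 [] := by
  refine ⟨le_refl 0, by simp, List.nodup_nil, ?_, ?_⟩
  · intro t ht; simp at ht
  · intro v m hm; simp [PySem.Dict.get?_empty] at hm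

-- ===== VERDICT (by name: the statement is the Claim_ definition above) =====
theorem longest_spec : Claim_equal_longest := by
  intro n _ _
  show longest n = longest_alt n
  exact fold_eq n 0 PySem.Dict.empty 0 0 [] inv_init
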